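-- pv_equiv track=rewrite | github.com/albertpatterson/rigel_qa | rag/rag_context.py | map_results
-- ===== SOURCE A (Python) =====
-- def map_results(results, fields=["ids", "documents"]):
--     out = []
--     for field in fields:
--         data = results[field]
--         for i in range(len(data)):
--             if len(out) <= i:
--                 out.append([])
--
--             row = out[i]
--             for j in range(len(data[i])):
--                 if len(out[i]) <= j:
--                     row.append({})
--
--                 el = row[j]
--                 el[field] = data[i][j]
--
--     return out
-- ===== SOURCE B (Python) =====
-- def map_results(results, fields=["ids", "documents"]):
--     datas = [results[f] for f in fields]
--     n_rows = max((len(d) for d in datas), default=0)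
--     out = []
--     for i in range(n_rows):
--         n_cols = max((len(d[i]) for d in datas if i < len(d)), default=0)
--         row = []
--         for j in range(n_cols):
--             el = {}
--             for f, d in zip(fields, datas):
--                 if i < len(d) and j < len(d[i]):
--                     el[f] = d[i][j]
--             row.append(el)
--         out.append(row)
--     return out
-- ===== Notes on version B (the rewrite author's own statement) =====
-- stated objective: alternative
-- what changed: B precomputes the grid shape (n_rows, then n_cols per row) from the field data and fills each cell dict directly, instead of A's field-major incremental growth that pads and mutates out/row/el in place.
import Mathlib
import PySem

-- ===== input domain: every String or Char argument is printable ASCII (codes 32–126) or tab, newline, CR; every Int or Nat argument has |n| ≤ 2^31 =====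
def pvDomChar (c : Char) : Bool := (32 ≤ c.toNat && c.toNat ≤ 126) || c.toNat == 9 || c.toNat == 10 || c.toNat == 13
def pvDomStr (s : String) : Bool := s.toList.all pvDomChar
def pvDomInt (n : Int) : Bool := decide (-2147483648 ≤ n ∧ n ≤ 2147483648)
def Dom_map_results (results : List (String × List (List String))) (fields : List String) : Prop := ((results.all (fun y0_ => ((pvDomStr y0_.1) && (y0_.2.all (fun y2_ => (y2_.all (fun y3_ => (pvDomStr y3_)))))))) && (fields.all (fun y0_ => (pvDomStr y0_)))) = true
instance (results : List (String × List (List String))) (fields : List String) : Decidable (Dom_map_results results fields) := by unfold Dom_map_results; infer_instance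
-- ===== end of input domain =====

-- B reshapes the fields' data by precomputing the grid shape and filling each cell dict directly,
-- instead of A's field-major incremental padding and in-place mutation (alternative decomposition, same cost).

-- shared primitive: Python's `el[k] = v` on a dict kept as an assoc list (overwrite in place, else append)
def pySetItem (el : List (String × String)) (k v : String) : List (String × String) :=
  (PySem.Dict.insert (PySem.Dict.mk el) k v).items

-- ===== PORT A =====
def map_results (results : List (String × List (List String))) (fields : List String) : List (List (List (String × String))) :=
  fields.foldl (fun out field =>
    let data := (PySem.Dict.get? (PySem.Dict.mk results) field).getD []
    (List.range data.length).foldl (fun out i =>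
      let out1 := if out.length ≤ i then out ++ [[]] else out
      let di := data.getD i []
      out1.set i ((List.range di.length).foldl (fun row j =>
        let row1 := if row.length ≤ j then row ++ [[]] else row
        row1.set j (pySetItem (row1.getD j []) field (di.getD j ""))) (out1.getD i []))) out) []

-- ===== PORT B =====
def nRowsOf (datas : List (List (List String))) : Nat :=
  datas.foldl (fun m d => max m d.length) 0

def nColsOf (datas : List (List (List String))) (i : Nat) : Nat :=
  datas.foldl (fun m d => if i < d.length then max m (d.getD i []).length else m) 0

def cellOf (pairs : List (String × List (List String))) (i j : Nat) : List (String × String) :=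
  pairs.foldl (fun el p =>
    if i < p.2.length ∧ j < (p.2.getD i []).length then
      pySetItem el p.1 ((p.2.getD i []).getD j "")
    else el) []

def map_results_alt (results : List (String × List (List String))) (fields : List String) : List (List (List (String × String))) :=
  let datas := fields.map (fun f => (PySem.Dict.get? (PySem.Dict.mk results) f).getD [])
  (List.range (nRowsOf datas)).map (fun i =>
    (List.range (nColsOf datas i)).map (fun j => cellOf (fields.zip datas) i j))

-- ===== PRECONDITION & SPEC =====
-- Pre_ excludes exactly the inputs where Python A raises KeyError: a requested field absent from results.
def Pre_map_results (results : List (String × List (List String))) (fields : List String) : Prop :=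
  ∀ f ∈ fields, f ∈ results.map Prod.fst
instance (results : List (String × List (List String))) (fields : List String) : Decidable (Pre_map_results results fields) := by unfold Pre_map_results; infer_instance

def pvWitness_map_results : (List (String × List (List String))) × List String :=
  ([("ids", [["a", "b"]]), ("documents", [["x"]])], ["ids", "documents"])

def Spec_map_results (results : List (String × List (List String))) (fields : List String) (out : List (List (List (String × String)))) : Prop := out = map_results_alt results fields
instance (results : List (String × List (List String))) (fields : List String) (out : List (List (List (String × String)))) : Decidable (Spec_map_results results fields out) := by unfold Spec_map_results; infer_instance

-- ===== CLAIM (what is proved, stated in full; the proofs are below) =====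
def Claim_equal_map_results : Prop := ∀ (results : List (String × List (List String))) (fields : List String), Dom_map_results results fields → Pre_map_results results fields → Spec_map_results results fields (map_results results fields)

-- ===== LEMMAS AND PROOFS =====

-- a list is the range-map of its getD
lemma self_eq_range_map_getD {α : Type} (dflt : α) (xs : List α) :
    (List.range xs.length).map (fun j => xs.getD j dflt) = xs := by
  apply List.ext_getElem
  · simp
  · intro i h1 h2
    simp [List.getD_eq_getElem?_getD, List.getElem?_eq_getElem h2]

lemma getD_range_map {α : Type} (dflt : α) (m : Nat) (h : Nat → α) (j : Nat) :
    ((List.range m).map h).getD j dflt = if j < m then h j else dflt := by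
  by_cases hj : j < m
  · rw [List.getD_eq_getElem?_getD, List.getElem?_eq_getElem (by simpa using hj)]
    simp [hj]
  · rw [List.getD_eq_getElem?_getD, List.getElem?_eq_none (by simpa using Nat.le_of_not_lt hj)]
    simp [hj]

lemma getD_append_single {α : Type} (dflt : α) (L : List α) (j : Nat) :
    (L ++ [dflt]).getD j dflt = L.getD j dflt := by
  by_cases hj : j < L.length
  · rw [List.getD_eq_getElem?_getD, List.getD_eq_getElem?_getD, List.getElem?_append_left hj]
  · by_cases hj2 : j = L.length
    · subst hj2
      rw [List.getD_eq_getElem?_getD, List.getElem?_append_right (le_refl _),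
        List.getD_eq_getElem?_getD, List.getElem?_eq_none (le_refl _)]
      simp
    · rw [List.getD_eq_getElem?_getD, List.getElem?_eq_none (by simp; omega),
        List.getD_eq_getElem?_getD, List.getElem?_eq_none (by omega)]

-- the pad-and-set loop both of A's loops are instances of
lemma padset {α : Type} (dflt : α) (upd : Nat → α → α) (n : Nat) (xs : List α) :
    (List.range n).foldl
      (fun ys j => (if ys.length ≤ j then ys ++ [dflt] else ys).set j
        (upd j ((if ys.length ≤ j then ys ++ [dflt] else ys).getD j dflt))) xs
    = (List.range (max xs.length n)).map
        (fun j => if j < n then upd j (xs.getD j dflt) else xs.getD j dflt) := by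
  induction n with
  | zero => simpa using (self_eq_range_map_getD dflt xs).symm
  | succ n ih =>
    rw [List.range_succ, List.foldl_append, ih, List.foldl_cons, List.foldl_nil]
    set g : Nat → α := fun j => if j < n then upd j (xs.getD j dflt) else xs.getD j dflt with hg
    set L : List α := (List.range (max xs.length n)).map g with hLdef
    have hlen : L.length = max xs.length n := by simp [hLdef]
    have hLget : ∀ j, L.getD j dflt = if j < max xs.length n then g j else dflt := by
      intro j; rw [hLdef, getD_range_map]
    have hPget : (if L.length ≤ n then L ++ [dflt] else L).getD n dflt = xs.getD n dflt := by
      split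
      · rw [getD_append_single, hLget]
        split
        · simp only [hg]
          split
          · omega
          · rfl
        · rw [List.getD_eq_getElem?_getD, List.getElem?_eq_none (by omega)]
          rfl
      · rw [hLget]
        split
        · simp only [hg]
          split
          · omega
          · rfl
        · omega
    rw [hPget]
    apply List.ext_getElem
    · split <;> simp [hlen] <;> omega
    · intro i h1 h2
      simp only [List.length_map, List.length_range] at h2
      rw [List.getElem_set]
      by_cases hin : n = i
      · subst hin
        rw [if_pos rfl]
        simp only [List.getElem_map, List.getElem_range]
        rw [if_pos (by omega)]
      · rw [if_neg hin]
        simp only [List.length_set] at h1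
        have hi' : i < n + 1 ∨ i < max xs.length n := by
          by_cases hp : L.length ≤ n
          · rw [if_pos hp] at h1; simp [hlen] at h1; omega
          · rw [if_neg hp] at h1; omega
        split
        · rename_i hp
          have hiL : i < n := by simp [hlen] at hp; omega
          rw [List.getElem_append_left (by omega)]
          simp only [hLdef, List.getElem_map, List.getElem_range, hg]
          rw [if_pos hiL, if_pos (by omega)]
        · rename_i hp
          have hiL : i < L.length := by rw [if_neg hp] at h1; exact h1
          simp only [hLdef, List.getElem_map, List.getElem_range, hg]
          by_cases hi2 : i < n
          · rw [if_pos hi2, if_pos (by omega)]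
          · rw [if_neg hi2, if_neg (by omega)]

-- skipping fold leaves the accumulator unchanged
lemma foldl_skip {α β : Type} (c : β → Prop) [DecidablePred c] (f : α → β → α) (a : α)
    (l : List β) (h : ∀ x ∈ l, ¬ c x) :
    l.foldl (fun s x => if c x then f s x else s) a = a := by
  induction l generalizing a with
  | nil => rfl
  | cons x t ihl =>
    simp only [List.foldl_cons, if_neg (h x (by simp))]
    exact ihl a (fun y hy => h y (by simp [hy]))

lemma le_nRowsOf_init (datas : List (List (List String))) (a : Nat) :
    a ≤ datas.foldl (fun m d => max m d.length) a := by
  induction datas generalizing a with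
  | nil => simp
  | cons d t ih => exact le_trans (Nat.le_max_left _ _) (ih (max a d.length))

lemma len_le_nRowsOf_aux (datas : List (List (List String))) (a : Nat)
    (d : List (List String)) (h : d ∈ datas) :
    d.length ≤ datas.foldl (fun m d => max m d.length) a := by
  induction datas generalizing a with
  | nil => simp at h
  | cons x t ih =>
    rcases List.mem_cons.mp h with h | h
    · subst h
      exact le_trans (Nat.le_max_right a d.length) (le_nRowsOf_init t _)
    · exact ih _ h

lemma len_le_nRowsOf (datas : List (List (List String))) (d : List (List String))
    (h : d ∈ datas) : d.length ≤ nRowsOf datas :=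
  len_le_nRowsOf_aux datas 0 d h

lemma nColsOf_eq_zero (datas : List (List (List String))) (i : Nat)
    (h : nRowsOf datas ≤ i) : nColsOf datas i = 0 := by
  unfold nColsOf
  exact foldl_skip _ _ 0 datas (fun d hd => by
    have := len_le_nRowsOf datas d hd; omega)

lemma le_nColsOf_init (datas : List (List (List String))) (i : Nat) (a : Nat) :
    a ≤ datas.foldl (fun m d => if i < d.length then max m (d.getD i []).length else m) a := by
  induction datas generalizing a with
  | nil => simp
  | cons d t ih =>
    simp only [List.foldl_cons]
    split
    · exact le_trans (Nat.le_max_left _ _) (ih _)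
    · exact ih a

lemma celllen_le_nColsOf_aux (datas : List (List (List String))) (i : Nat) (a : Nat)
    (d : List (List String)) (hd : d ∈ datas) (hi : i < d.length) :
    (d.getD i []).length ≤ datas.foldl (fun m d => if i < d.length then max m (d.getD i []).length else m) a := by
  induction datas generalizing a with
  | nil => simp at hd
  | cons x t ih =>
    rcases List.mem_cons.mp hd with h | h
    · subst h
      simp only [List.foldl_cons, if_pos hi]
      exact le_trans (Nat.le_max_right _ _) (le_nColsOf_init t i _)
    · simp only [List.foldl_cons]
      exact ih _ h

lemma celllen_le_nColsOf (datas : List (List (List String))) (i : Nat)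
    (d : List (List String)) (hd : d ∈ datas) (hi : i < d.length) :
    (d.getD i []).length ≤ nColsOf datas i :=
  celllen_le_nColsOf_aux datas i 0 d hd hi

lemma cellOf_nil_of_col_oob (ps : List (String × List (List String))) (i j : Nat)
    (h : nColsOf (ps.map Prod.snd) i ≤ j) : cellOf ps i j = [] := by
  unfold cellOf
  exact foldl_skip _ _ [] ps (fun p hp => by
    intro hc
    have := celllen_le_nColsOf (ps.map Prod.snd) i p.2 (List.mem_map_of_mem hp) hc.1
    omega)

-- the grid B builds, as a function of the (field, data) pairs
def gridPS (ps : List (String × List (List String))) : List (List (List (String × String))) :=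
  (List.range (nRowsOf (ps.map Prod.snd))).map (fun i =>
    (List.range (nColsOf (ps.map Prod.snd) i)).map (fun j => cellOf ps i j))

def rowOf (ps : List (String × List (List String))) (i : Nat) : List (List (String × String)) :=
  (List.range (nColsOf (ps.map Prod.snd) i)).map (fun j => cellOf ps i j)

lemma gridPS_getD (ps : List (String × List (List String))) (i : Nat) :
    (gridPS ps).getD i [] = rowOf ps i := by
  by_cases h : i < nRowsOf (ps.map Prod.snd)
  · unfold gridPS rowOf
    rw [List.getD_eq_getElem?_getD, List.getElem?_eq_getElem (by simpa using h)]
    simp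
  · unfold gridPS rowOf
    rw [List.getD_eq_getElem?_getD, List.getElem?_eq_none (by simpa using Nat.le_of_not_lt h)]
    simp [nColsOf_eq_zero _ _ (Nat.le_of_not_lt h)]

lemma rowOf_getD (ps : List (String × List (List String))) (i j : Nat) :
    (rowOf ps i).getD j [] = cellOf ps i j := by
  by_cases h : j < nColsOf (ps.map Prod.snd) i
  · unfold rowOf
    rw [List.getD_eq_getElem?_getD, List.getElem?_eq_getElem (by simpa using h)]
    simp
  · unfold rowOf
    rw [List.getD_eq_getElem?_getD, List.getElem?_eq_none (by simpa using Nat.le_of_not_lt h)]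
    simp [cellOf_nil_of_col_oob _ _ _ (Nat.le_of_not_lt h)]

lemma rowOf_length (ps : List (String × List (List String))) (i : Nat) :
    (rowOf ps i).length = nColsOf (ps.map Prod.snd) i := by simp [rowOf]

lemma gridPS_length (ps : List (String × List (List String))) :
    (gridPS ps).length = nRowsOf (ps.map Prod.snd) := by simp [gridPS]

-- snoc steps of the three fold helpers
lemma nRowsOf_snoc (datas : List (List (List String))) (d : List (List String)) :
    nRowsOf (datas ++ [d]) = max (nRowsOf datas) d.length := by
  simp [nRowsOf, List.foldl_append]

lemma nColsOf_snoc (datas : List (List (List String))) (d : List (List String)) (i : Nat) :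
    nColsOf (datas ++ [d]) i
      = if i < d.length then max (nColsOf datas i) (d.getD i []).length else nColsOf datas i := by
  simp [nColsOf, List.foldl_append]

lemma cellOf_snoc (ps : List (String × List (List String))) (f : String)
    (d : List (List String)) (i j : Nat) :
    cellOf (ps ++ [(f, d)]) i j
      = if i < d.length ∧ j < (d.getD i []).length then
          pySetItem (cellOf ps i j) f ((d.getD i []).getD j "")
        else cellOf ps i j := by
  simp [cellOf, List.foldl_append]

-- A's per-field pass, applied to B's grid, extends the grid by that pair
lemma stepA_grid (ps : List (String × List (List String))) (f : String) (d : List (List String)) :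
    (List.range d.length).foldl (fun out i =>
      let out1 := if out.length ≤ i then out ++ [[]] else out
      let di := d.getD i []
      out1.set i ((List.range di.length).foldl (fun row j =>
        let row1 := if row.length ≤ j then row ++ [[]] else row
        row1.set j (pySetItem (row1.getD j []) f (di.getD j ""))) (out1.getD i []))) (gridPS ps)
    = gridPS (ps ++ [(f, d)]) := by
  have hrow : ∀ i : Nat,
      (List.range ((d.getD i []).length)).foldl (fun row j =>
        (if row.length ≤ j then row ++ [([] : List (String × String))] else row).set j
          (pySetItem ((if row.length ≤ j then row ++ [([] : List (String × String))] else row).getD j []) f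
            ((d.getD i []).getD j ""))) (rowOf ps i)
      = (List.range (max (nColsOf (ps.map Prod.snd) i) ((d.getD i []).length))).map
          (fun j => if j < (d.getD i []).length then pySetItem (cellOf ps i j) f ((d.getD i []).getD j "") else cellOf ps i j) := by
    intro i
    refine Eq.trans (padset ([] : List (String × String))
      (fun j y => pySetItem y f ((d.getD i []).getD j "")) ((d.getD i []).length) (rowOf ps i)) ?_
    rw [rowOf_length]
    exact List.map_congr_left (fun j hj => by rw [rowOf_getD])
  refine Eq.trans (padset ([] : List (List (String × String)))
    (fun i x => (List.range ((d.getD i []).length)).foldl (fun row j =>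
      (if row.length ≤ j then row ++ [([] : List (String × String))] else row).set j
        (pySetItem ((if row.length ≤ j then row ++ [([] : List (String × String))] else row).getD j []) f
          ((d.getD i []).getD j ""))) x) d.length (gridPS ps)) ?_
  simp only [gridPS_getD, gridPS_length]
  rw [show gridPS (ps ++ [(f, d)]) = (List.range (nRowsOf (ps.map Prod.snd ++ [d]))).map
      (fun i => (List.range (nColsOf (ps.map Prod.snd ++ [d]) i)).map
        (fun j => cellOf (ps ++ [(f, d)]) i j)) from by simp [gridPS]]
  rw [nRowsOf_snoc]
  apply List.ext_getElem
  · simp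
  · intro i h1 h2
    simp only [List.getElem_map, List.getElem_range]
    by_cases hid : i < d.length
    · rw [if_pos hid, hrow i, nColsOf_snoc, if_pos hid]
      apply List.map_congr_left
      intro j hj
      rw [cellOf_snoc]
      by_cases hjd : j < (d.getD i []).length
      · rw [if_pos hjd, if_pos ⟨hid, hjd⟩]
      · rw [if_neg hjd, if_neg (fun hc => hjd hc.2)]
    · rw [if_neg hid, nColsOf_snoc, if_neg hid]
      unfold rowOf
      apply List.map_congr_left
      intro j hj
      rw [cellOf_snoc, if_neg (fun hc => hid hc.1)]

lemma zip_self_map {α β : Type} (g : α → β) (l : List α) :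
    l.zip (l.map g) = l.map (fun a => (a, g a)) := by
  induction l with
  | nil => rfl
  | cons x t ih => simp [ih]

lemma foldA_eq_grid (results : List (String × List (List String))) (fs : List String) :
    fs.foldl (fun out field =>
      let data := (PySem.Dict.get? (PySem.Dict.mk results) field).getD []
      (List.range data.length).foldl (fun out i =>
        let out1 := if out.length ≤ i then out ++ [[]] else out
        let di := data.getD i []
        out1.set i ((List.range di.length).foldl (fun row j =>
          let row1 := if row.length ≤ j then row ++ [[]] else row
          row1.set j (pySetItem (row1.getD j []) field (di.getD j ""))) (out1.getD i []))) out) []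
    = gridPS (fs.map (fun f => (f, (PySem.Dict.get? (PySem.Dict.mk results) f).getD []))) := by
  induction fs using List.reverseRecOn with
  | nil => rfl
  | append_singleton fs f ih =>
    rw [List.foldl_append, List.foldl_cons, List.foldl_nil, ih, List.map_append, List.map_cons,
      List.map_nil]
    exact stepA_grid _ f _

theorem map_results_spec : Claim_equal_map_results := by
  intro results fields _ _
  unfold Spec_map_results map_results map_results_alt
  rw [foldA_eq_grid]
  simp [gridPS, zip_self_map, List.map_map, Function.comp_def]
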